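-- pv_equiv track=rewrite | github.com/lapastillaroja/replay-control | tools/analyze_regional_mods.py | extract_paren_tags
-- ===== SOURCE A (Python) =====
-- def extract_paren_tags(stem):
--     """Extract all (...) tags from a filename stem."""
--     tags = []
--     i = 0
--     while i < len(stem):
--         open_idx = stem.find('(', i)
--         if open_idx == -1:
--             break
--         close_idx = stem.find(')', open_idx + 1)
--         if close_idx == -1:
--             break
--         tags.append(stem[open_idx + 1:close_idx])
--         i = close_idx + 1
--     return tags
-- ===== SOURCE B (Python) =====
-- def extract_paren_tags(stem):
--     """Extract all (...) tags from a filename stem (single-pass state machine)."""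
--     tags = []
--     cur = None
--     for ch in stem:
--         if cur is None:
--             if ch == '(':
--                 cur = []
--         elif ch == ')':
--             tags.append(''.join(cur))
--             cur = None
--         else:
--             cur.append(ch)
--     return tags
-- ===== Notes on version B (the rewrite author's own statement) =====
-- stated objective: alternative
-- what changed: Replaced the while-loop of repeated str.find index scans and slicing with a single left-to-right pass over the characters that maintains an optional open-tag buffer (a small state machine).
import Mathlib
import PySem

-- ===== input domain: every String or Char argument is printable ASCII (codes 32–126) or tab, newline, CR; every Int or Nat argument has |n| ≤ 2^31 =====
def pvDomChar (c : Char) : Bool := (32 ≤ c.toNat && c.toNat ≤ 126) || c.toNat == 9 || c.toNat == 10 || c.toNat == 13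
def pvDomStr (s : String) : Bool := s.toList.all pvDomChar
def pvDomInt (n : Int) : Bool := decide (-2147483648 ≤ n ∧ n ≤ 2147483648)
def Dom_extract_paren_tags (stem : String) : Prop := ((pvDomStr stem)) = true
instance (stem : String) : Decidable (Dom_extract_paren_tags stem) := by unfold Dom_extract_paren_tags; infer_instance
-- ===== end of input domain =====

-- B replaces A's repeated str.find scans with a single left-to-right state-machine pass over the
-- characters (objective: alternative decomposition, same O(n) cost).

-- ===== PORT A =====
-- A's while-loop: state (tags, i); fuel is only a totality guard (i strictly increases each
-- iteration, so stem.length + 1 iterations always suffice — proved in pvMain below).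
def pvAGo (stem : String) : Nat → List String → Int → List String
  | 0, tags, _ => tags
  | fuel + 1, tags, i =>
    if i < PySem.Str.len stem then
      let o := PySem.Str.findFrom stem "(" i
      if o = -1 then tags
      else
        let c := PySem.Str.findFrom stem ")" (o + 1)
        if c = -1 then tags
        else pvAGo stem fuel (tags ++ [PySem.Str.slice stem (some (o + 1)) (some c)]) (c + 1)
    else tags

def extract_paren_tags (stem : String) : List String :=
  pvAGo stem (stem.toList.length + 1) [] 0

-- ===== PORT B =====
-- one fold step of B's for-loop; state = (tags so far, Option (chars of the currently open tag))
def pvBStep (st : List String × Option (List Char)) (ch : Char) : List String × Option (List Char) :=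
  match st.2 with
  | none => if ch = '(' then (st.1, some []) else st
  | some cur =>
      if ch = ')' then (st.1 ++ [String.ofList cur], none)
      else (st.1, some (cur ++ [ch]))

def extract_paren_tags_alt (stem : String) : List String :=
  (stem.toList.foldl pvBStep ([], none)).1

-- ===== PRECONDITION & SPEC =====
def Spec_extract_paren_tags (stem : String) (out : List String) : Prop := out = extract_paren_tags_alt stem
instance (stem : String) (out : List String) : Decidable (Spec_extract_paren_tags stem out) := by unfold Spec_extract_paren_tags; infer_instance

-- ===== CLAIM (what is proved, stated in full; the proofs are below) =====
def Claim_equal_extract_paren_tags : Prop := ∀ (stem : String), Dom_extract_paren_tags stem → Spec_extract_paren_tags stem (extract_paren_tags stem)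

-- ===== LEMMAS AND PROOFS =====

-- B's fold leaves the "outside" state untouched while no '(' appears
theorem pvFold_no_open (tags : List String) (l : List Char) (h : '(' ∉ l) :
    l.foldl pvBStep (tags, none) = (tags, none) := by
  induction l with
  | nil => rfl
  | cons x xs ih =>
      have hx : x ≠ '(' := fun he => h (he ▸ List.mem_cons_self)
      have hxs : '(' ∉ xs := fun hm => h (List.mem_cons_of_mem _ hm)
      simp only [List.foldl_cons, pvBStep, if_neg hx]
      exact ih hxs

-- B's fold accumulates characters while inside a tag and no ')' appears
theorem pvFold_no_close (tags : List String) (cur : List Char) (l : List Char) (h : ')' ∉ l) :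
    l.foldl pvBStep (tags, some cur) = (tags, some (cur ++ l)) := by
  induction l generalizing cur with
  | nil => simp
  | cons x xs ih =>
      have hx : x ≠ ')' := fun he => h (he ▸ List.mem_cons_self)
      have hxs : ')' ∉ xs := fun hm => h (List.mem_cons_of_mem _ hm)
      simp only [List.foldl_cons, pvBStep, if_neg hx]
      rw [ih (cur ++ [x]) hxs]
      simp

-- a failed single-char find from index k means the character is absent from the k-suffix
theorem pvFind_neg (cs : List Char) (ch : Char) (k : Nat) (hk : k ≤ cs.length)
    (h : PySem.Chars.findFrom cs [ch] (k : Int) = -1) : ch ∉ cs.drop k := by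
  have := (PySem.Chars.findFrom_natCast_eq_neg_one_iff cs [ch] k hk).1 h
  simpa [List.singleton_infix_iff] using this

-- a successful single-char find from index k splits the k-suffix at the FIRST occurrence
theorem pvFind_split (cs : List Char) (ch : Char) (k : Nat) (hk : k ≤ cs.length)
    (h : PySem.Chars.findFrom cs [ch] (k : Int) ≠ -1) :
    ∃ r : Nat, PySem.Chars.findFrom cs [ch] (k : Int) = (r : Int) ∧ k ≤ r ∧ r < cs.length ∧
      cs.drop k = (cs.drop k).take (r - k) ++ ch :: cs.drop (r + 1) ∧
      ch ∉ (cs.drop k).take (r - k) := by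
  obtain ⟨hkr, hpre, hmin⟩ := PySem.Chars.findFrom_natCast_spec cs [ch] k hk h
  set r0 := PySem.Chars.findFrom cs [ch] (k : Int) with hr0def
  have hr0 : 0 ≤ r0 := le_trans (by exact_mod_cast Int.natCast_nonneg k) hkr
  refine ⟨r0.toNat, (Int.toNat_of_nonneg hr0).symm, ?_, ?_, ?_, ?_⟩
  · omega
  · -- r0.toNat < cs.length
    by_contra hge
    push Not at hge
    rw [List.drop_eq_nil_of_le hge] at hpre
    simp at hpre
  · -- decomposition
    obtain ⟨t, ht⟩ := hpre
    have hrlen : r0.toNat < cs.length := by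
      by_contra hge
      push Not at hge
      rw [List.drop_eq_nil_of_le hge] at ht
      simp at ht
    have hd := List.drop_eq_getElem_cons hrlen
    rw [hd] at ht
    have hch : ch = cs[r0.toNat] := by
      have := List.head_eq_of_cons_eq ht
      simpa using this
    have hsplit := (List.take_append_drop (r0.toNat - k) (cs.drop k)).symm
    have hdd : (cs.drop k).drop (r0.toNat - k) = cs.drop r0.toNat := by
      rw [List.drop_drop]
      congr 1
      omega
    rw [hdd, hd, ← hch] at hsplit
    exact hsplit
  · -- minimality: ch does not occur before position r0.toNat
    intro hmem
    obtain ⟨j, hjlt, hje⟩ := List.mem_iff_getElem.1 hmem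
    have hjlt' : j < r0.toNat - k := by
      have := hjlt
      simp [List.length_take] at this
      omega
    have hjd : j < (cs.drop k).length := by
      simp [List.length_take] at hjlt
      simp
      omega
    have hkj : k + j < cs.length := by
      simp at hjd
      omega
    have hval : cs[k + j] = ch := by
      have h1 : (cs.drop k)[j]'hjd = cs[k + j] := by
        simp
      rw [← h1]
      rw [← hje]
      simp [List.getElem_take]
    apply hmin (k + j) (by omega) (by omega)
    refine ⟨cs.drop (k + j + 1), ?_⟩
    rw [List.drop_eq_getElem_cons hkj, hval]
    rfl

-- main invariant: A's loop from index i equals B's fold over the i-suffix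
theorem pvMain (stem : String) : ∀ (fuel : Nat) (i : Nat) (tags : List String),
    stem.toList.length - i ≤ fuel →
    pvAGo stem fuel tags (i : Int) = ((stem.toList.drop i).foldl pvBStep (tags, none)).1 := by
  intro fuel
  induction fuel with
  | zero =>
      intro i tags h
      rw [List.drop_eq_nil_of_le (by omega)]
      rfl
  | succ f ih =>
      intro i tags h
      by_cases hlen : stem.toList.length ≤ i
      · have hcond : ¬ ((i : Int) < PySem.Str.len stem) := by
          rw [PySem.Str.len_eq]
          exact_mod_cast not_lt.2 hlen
        rw [List.drop_eq_nil_of_le hlen]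
        simp only [pvAGo]
        rw [if_neg hcond]
        rfl
      · push Not at hlen
        have hcond : ((i : Int) < PySem.Str.len stem) := by
          rw [PySem.Str.len_eq]
          exact_mod_cast hlen
        have hopen : PySem.Str.findFrom stem "(" (i : Int) =
            PySem.Chars.findFrom stem.toList ['('] (i : Int) := by
          rw [PySem.Str.findFrom_eq]
          rfl
        by_cases ho : PySem.Chars.findFrom stem.toList ['('] (i : Int) = -1
        · have hnot := pvFind_neg stem.toList '(' i (le_of_lt hlen) ho
          rw [pvFold_no_open tags _ hnot]
          simp only [pvAGo]
          rw [if_pos hcond, hopen, if_pos ho]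
        · obtain ⟨r, hoeq, hir, hrlen, hdec1, hpre1⟩ :=
            pvFind_split stem.toList '(' i (le_of_lt hlen) ho
          set pre := (stem.toList.drop i).take (r - i) with hpredef
          have hoadd : ((r : Int) + 1) = ((r + 1 : Nat) : Int) := by push_cast; ring
          have hclose : PySem.Str.findFrom stem ")" (PySem.Str.findFrom stem "(" (i : Int) + 1) =
              PySem.Chars.findFrom stem.toList [')'] ((r + 1 : Nat) : Int) := by
            rw [PySem.Str.findFrom_eq, hopen, hoeq, hoadd]
            rfl
          by_cases hc : PySem.Chars.findFrom stem.toList [')'] ((r + 1 : Nat) : Int) = -1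
          · -- no closing paren: both sides return the tags accumulated so far
            have hnot := pvFind_neg stem.toList ')' (r + 1) (by omega) hc
            have hA : pvAGo stem (f + 1) tags (i : Int) = tags := by
              simp only [pvAGo]
              rw [if_pos hcond, hclose, hopen, hoeq]
              rw [if_neg (show ¬ ((r : Int) = -1) by omega), if_pos hc]
            rw [hA, hdec1, List.foldl_append, pvFold_no_open tags _ hpre1]
            simp only [List.foldl_cons, pvBStep, if_true]
            rw [pvFold_no_close tags [] _ hnot]
          · obtain ⟨m, hceq, hrm, hmlen, hdec2, hmid⟩ :=
              pvFind_split stem.toList ')' (r + 1) (by omega) hc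
            set mid := (stem.toList.drop (r + 1)).take (m - (r + 1)) with hmiddef
            have hslice : PySem.Str.slice stem (some ((r + 1 : Nat) : Int)) (some (m : Int)) =
                String.ofList mid := by
              simp only [PySem.Str.slice, PySem.Chars.slice]
              rw [PySem.List.slice_toNat _ (by positivity) (by positivity)]
              rw [hmiddef]
              congr 1
            have hA : pvAGo stem (f + 1) tags (i : Int) =
                pvAGo stem f (tags ++ [String.ofList mid]) ((m : Int) + 1) := by
              simp only [pvAGo]
              rw [if_pos hcond, hclose, hceq, hopen, hoeq]
              rw [if_neg (show ¬ ((r : Int) = -1) by omega),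
                  if_neg (show ¬ ((m : Int) = -1) by omega)]
              rw [hoadd, hslice]
            have hmadd : ((m : Int) + 1) = ((m + 1 : Nat) : Int) := by push_cast; ring
            rw [hA, hmadd, ih (m + 1) _ (by omega)]
            rw [hdec1, List.foldl_append, pvFold_no_open tags _ hpre1]
            simp only [List.foldl_cons, pvBStep, if_true]
            rw [hdec2, List.foldl_append, pvFold_no_close tags [] _ hmid]
            simp [pvBStep]

-- ===== VERDICT (by name: the statement is the Claim_ definition above) =====
theorem extract_paren_tags_spec : Claim_equal_extract_paren_tags := by
  intro stem _
  unfold Spec_extract_paren_tags extract_paren_tags extract_paren_tags_alt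
  have := pvMain stem (stem.toList.length + 1) 0 [] (by omega)
  simpa using this
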